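-- pv_equiv track=rewrite | github.com/stephank007/python_challenges | online_judges/maximizing_xor/maximizing_xor_solution.py | max_xor
-- ===== SOURCE A (Python) =====
-- def max_xor(lower, upper):
--     result = 0
--     for l in range(lower, upper + 1):
--         for u in range(lower, upper + 1):
--             curr = l ^ u
--             if result < curr:
--                 result = curr
--     return result
-- ===== SOURCE B (Python) =====
-- def max_xor(lower, upper):
--     if upper < lower:
--         return 0
--     if lower >= 0 or upper < 0:
--         return 2 ** (lower ^ upper).bit_length() - 1
--     return 2 ** max(upper.bit_length(), (-lower - 1).bit_length()) - 1
-- ===== Notes on version B (the rewrite author's own statement) =====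
-- stated objective: simpler
-- what changed: Replaced A's nested scan over all pairs (l, u) in [lower, upper]^2 with the closed form 2^bit_length - 1 (on the xor of the endpoints, split by sign since Python ints are two's complement), so B has no loops.
import Mathlib
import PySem

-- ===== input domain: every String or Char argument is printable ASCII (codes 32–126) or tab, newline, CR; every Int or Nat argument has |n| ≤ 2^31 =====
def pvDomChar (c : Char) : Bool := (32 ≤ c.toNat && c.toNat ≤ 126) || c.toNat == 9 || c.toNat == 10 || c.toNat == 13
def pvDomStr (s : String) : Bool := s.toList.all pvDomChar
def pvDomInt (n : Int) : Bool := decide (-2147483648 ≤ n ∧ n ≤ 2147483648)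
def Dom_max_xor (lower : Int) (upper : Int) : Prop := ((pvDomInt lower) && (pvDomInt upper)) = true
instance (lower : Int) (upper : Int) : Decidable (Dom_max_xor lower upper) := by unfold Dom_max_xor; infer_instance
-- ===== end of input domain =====

-- B replaces A's nested scan over all pairs by the closed form 2^bit_length(...) - 1; equivalence of the return value is proved on all inputs.

-- ===== PORT A =====
def max_xor (lower : Int) (upper : Int) : Int :=
  (PySem.List.pyRange lower (upper + 1) 1).foldl (fun result l =>
    (PySem.List.pyRange lower (upper + 1) 1).foldl (fun result u =>
      let curr := PySem.Int.bxor l u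
      if result < curr then curr else result) result) 0

-- ===== PORT B =====
def max_xor_alt (lower : Int) (upper : Int) : Int :=
  if upper < lower then 0
  else if 0 ≤ lower ∨ upper < 0 then
    2 ^ PySem.Int.bitLength (PySem.Int.bxor lower upper) - 1
  else
    2 ^ max (PySem.Int.bitLength upper) (PySem.Int.bitLength (-lower - 1)) - 1

-- ===== PRECONDITION & SPEC =====
def Spec_max_xor (lower : Int) (upper : Int) (out : Int) : Prop := out = max_xor_alt lower upper
instance (lower : Int) (upper : Int) (out : Int) : Decidable (Spec_max_xor lower upper out) := by unfold Spec_max_xor; infer_instance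

-- ===== CLAIM (what is proved, stated in full; the proofs are below) =====
def Claim_equal_max_xor : Prop := ∀ (lower : Int) (upper : Int), Dom_max_xor lower upper → Spec_max_xor lower upper (max_xor lower upper)

-- ===== LEMMAS AND PROOFS =====

-- ---- pure Nat bit lemmas ----
theorem pvXorSplit (m x y r s : ℕ) (hr : r < 2^m) (hs : s < 2^m) :
    (2^m * x + r) ^^^ (2^m * y + s) = 2^m * (x ^^^ y) + (r ^^^ s) := by
  apply Nat.eq_of_testBit_eq
  intro i
  rw [Nat.testBit_xor, Nat.testBit_two_pow_mul_add _ hr, Nat.testBit_two_pow_mul_add _ hs,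
      Nat.testBit_two_pow_mul_add _ (Nat.xor_lt_two_pow hr hs), Nat.testBit_xor]
  split_ifs
  · simp
  · simp

theorem pvXorLtIffDivEq (k x y : ℕ) : x ^^^ y < 2^k ↔ x / 2^k = y / 2^k := by
  have hp : 0 < 2^k := Nat.two_pow_pos k
  have h : x ^^^ y = 2^k * (x / 2^k ^^^ y / 2^k) + (x % 2^k ^^^ y % 2^k) := by
    conv_lhs => rw [← Nat.div_add_mod x (2^k), ← Nat.div_add_mod y (2^k)]
    exact pvXorSplit k _ _ _ _ (Nat.mod_lt _ hp) (Nat.mod_lt _ hp)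
  have hm : x % 2^k ^^^ y % 2^k < 2^k := Nat.xor_lt_two_pow (Nat.mod_lt _ hp) (Nat.mod_lt _ hp)
  rw [h]
  constructor
  · intro hlt
    apply Nat.xor_eq_zero_iff.mp
    by_contra hne
    have h1 : 1 ≤ x / 2^k ^^^ y / 2^k := Nat.one_le_iff_ne_zero.mpr hne
    nlinarith
  · intro hd
    rw [hd]
    simpa using hm

theorem pvDivSandwich {L U x k : ℕ} (h1 : L ≤ x) (h2 : x ≤ U) (h : L / 2^k = U / 2^k) :
    x / 2^k = L / 2^k := by
  have a1 := Nat.div_le_div_right (c := 2^k) h1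
  have a2 := Nat.div_le_div_right (c := 2^k) h2
  omega

theorem pvNatBound {L U x y k : ℕ} (hk : L ^^^ U < 2^k)
    (hx1 : L ≤ x) (hx2 : x ≤ U) (hy1 : L ≤ y) (hy2 : y ≤ U) : x ^^^ y < 2^k := by
  have h := (pvXorLtIffDivEq k L U).mp hk
  rw [pvXorLtIffDivEq]
  rw [pvDivSandwich hx1 hx2 h, pvDivSandwich hy1 hy2 h]

theorem pvNatAchieve (L U k : ℕ) (hLU : L ≤ U) (h1 : L ^^^ U < 2^k)
    (h2 : 2^(k-1) ≤ L ^^^ U ∨ (L = U ∧ k = 0)) :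
    ∃ a b, L ≤ a ∧ a ≤ U ∧ L ≤ b ∧ b ≤ U ∧ a ^^^ b = 2^k - 1 := by
  rcases h2 with h2 | ⟨rfl, rfl⟩
  · have hk1 : 1 ≤ k := by
      by_contra h
      interval_cases k <;> omega
    have hpk : (2:ℕ)^k = 2 * 2^(k-1) := by
      rw [← pow_succ']
      congr 1
      omega
    have hp : 0 < (2:ℕ)^(k-1) := Nat.two_pow_pos _
    have hda : L / 2^k = U / 2^k := (pvXorLtIffDivEq k L U).mp h1
    have hdd : L / 2^(k-1) ≠ U / 2^(k-1) := by
      intro h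
      have := (pvXorLtIffDivEq (k-1) L U).mpr h
      omega
    have hmono : L / 2^(k-1) ≤ U / 2^(k-1) := Nat.div_le_div_right hLU
    have hdiv2 : ∀ n : ℕ, n / 2^k = n / 2^(k-1) / 2 := by
      intro n
      rw [Nat.div_div_eq_div_mul]
      congr 1
      rw [← pow_succ]
      congr 1
      omega
    have hL2 : L / 2^(k-1) / 2 = U / 2^(k-1) / 2 := by
      rw [← hdiv2, ← hdiv2]; exact hda
    set Q := L / 2^k with hQ
    have hQ2 : Q = L / 2^(k-1) / 2 := hdiv2 L
    have hQ3 : U / 2^k = U / 2^(k-1) / 2 := hdiv2 U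
    have hLd : L / 2^(k-1) = 2*Q := by omega
    have hUd : U / 2^(k-1) = 2*Q + 1 := by omega
    have hLsplit := Nat.div_add_mod L (2^(k-1))
    have hUsplit := Nat.div_add_mod U (2^(k-1))
    have hLmod : L % 2^(k-1) < 2^(k-1) := Nat.mod_lt _ hp
    have hUmod : U % 2^(k-1) < 2^(k-1) := Nat.mod_lt _ hp
    rw [hLd] at hLsplit
    rw [hUd] at hUsplit
    have hexp : 2^(k-1) * (2*Q+1) = 2^(k-1)*(2*Q) + 2^(k-1) := by ring
    refine ⟨2^(k-1)*(2*Q+1), 2^(k-1)*(2*Q) + (2^(k-1)-1), by omega, by omega, by omega, by omega, ?_⟩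
    have ha0 : 2^(k-1)*(2*Q+1) = 2^(k-1)*(2*Q+1) + 0 := by ring
    rw [ha0, pvXorSplit (k-1) _ _ 0 _ hp (by omega)]
    have h01 : (2*Q+1) ^^^ (2*Q) = 1 := by
      have e1 : 2*Q+1 = 2^1 * Q + 1 := by ring
      have e2 : 2*Q = 2^1 * Q + 0 := by ring
      rw [e1, e2, pvXorSplit 1 Q Q 1 0 (by norm_num) (by norm_num)]
      simp
    rw [h01, Nat.zero_xor]
    omega
  · exact ⟨L, L, le_refl _, le_refl _, le_refl _, le_refl _, by simp⟩

-- ---- fold lemmas ----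
theorem pvFoldlInitLe (g : Int → Int → Int) (hg : ∀ r l, r ≤ g r l) :
    ∀ (xs : List Int) (r : Int), r ≤ xs.foldl g r := by
  intro xs
  induction xs with
  | nil => intro r; simp
  | cons x xs ih =>
    intro r
    calc r ≤ g r x := hg r x
      _ ≤ (x :: xs).foldl g r := by simpa using ih (g r x)

theorem pvLeFoldlOfMem (g : Int → Int → Int) (hg : ∀ r l, r ≤ g r l)
    {v x : Int} (hstep : ∀ r, v ≤ g r x) :
    ∀ (xs : List Int) (r : Int), x ∈ xs → v ≤ xs.foldl g r := by
  intro xs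
  induction xs with
  | nil => intro r h; simp at h
  | cons y ys ih =>
    intro r h
    rcases List.mem_cons.mp h with rfl | h
    · calc v ≤ g r x := hstep r
        _ ≤ ys.foldl g (g r x) := pvFoldlInitLe g hg ys _
        _ = (x :: ys).foldl g r := by simp
    · simpa using ih (g r y) h

theorem pvFoldlLe (g : Int → Int → Int) (m : Int) :
    ∀ (xs : List Int), (∀ r l, l ∈ xs → r ≤ m → g r l ≤ m) →
      ∀ (r : Int), r ≤ m → xs.foldl g r ≤ m := by
  intro xs
  induction xs with
  | nil => intro _ r h; simpa using h
  | cons x xs ih =>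
    intro hstep r h
    simpa using ih (fun r l hl hr => hstep r l (List.mem_cons_of_mem _ hl) hr)
      (g r x) (hstep r x List.mem_cons_self h)

-- full characterisation of A's nested fold
theorem pvNestedFoldEq (xs : List Int) (f : Int → Int → Int) (m : Int) (h0 : 0 ≤ m)
    (hub : ∀ l ∈ xs, ∀ u ∈ xs, f l u ≤ m)
    (hach : ∃ l ∈ xs, ∃ u ∈ xs, f l u = m) :
    xs.foldl (fun r l => xs.foldl (fun r u => max r (f l u)) r) 0 = m := by
  have hginner : ∀ l r u, r ≤ max r (f l u) := fun _ r u => le_max_left _ _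
  have hgouter : ∀ r l, r ≤ xs.foldl (fun r u => max r (f l u)) r :=
    fun r l => pvFoldlInitLe _ (hginner l) xs r
  obtain ⟨l0, hl0, u0, hu0, hf0⟩ := hach
  apply le_antisymm
  · apply pvFoldlLe _ m xs _ 0 h0
    intro r l hl hr
    exact pvFoldlLe _ m xs (fun r' u hu hr' => max_le hr' (hub l hl u hu)) r hr
  · rw [← hf0]
    exact pvLeFoldlOfMem _ hgouter
      (fun r => pvLeFoldlOfMem _ (hginner l0) (fun r' => le_max_right _ _) xs r hu0) xs 0 hl0

-- ---- bxor bridges (from PySem.Int.bxor's definition) ----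
theorem pvBxorNN (a b : Int) (ha : 0 ≤ a) (hb : 0 ≤ b) :
    PySem.Int.bxor a b = ((a.toNat ^^^ b.toNat : ℕ) : Int) := by
  simp only [PySem.Int.bxor]
  rw [if_pos ha, if_pos hb]

theorem pvBxorNeg (a b : Int) (ha : a < 0) (hb : b < 0) :
    PySem.Int.bxor a b = (((-a-1).toNat ^^^ (-b-1).toNat : ℕ) : Int) := by
  simp only [PySem.Int.bxor]
  rw [if_neg (not_le.mpr ha), if_neg (not_le.mpr hb)]

theorem pvBxorMixedNeg (a b : Int) (h : (0 ≤ a ∧ b < 0) ∨ (a < 0 ∧ 0 ≤ b)) :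
    PySem.Int.bxor a b < 0 := by
  simp only [PySem.Int.bxor]
  rcases h with ⟨ha, hb⟩ | ⟨ha, hb⟩
  · rw [if_pos ha, if_neg (not_le.mpr hb)]
    have : (0:Int) ≤ ((a.toNat ^^^ (-b-1).toNat : ℕ) : Int) := Int.natCast_nonneg _
    omega
  · rw [if_neg (not_le.mpr ha), if_pos hb]
    have : (0:Int) ≤ (((-a-1).toNat ^^^ b.toNat : ℕ) : Int) := Int.natCast_nonneg _
    omega

-- A's fold written with max
theorem pvMaxXorEqNested (L U : Int) :
    max_xor L U = (PySem.List.pyRange L (U+1) 1).foldl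
      (fun r l => (PySem.List.pyRange L (U+1) 1).foldl
        (fun r u => max r (PySem.Int.bxor l u)) r) 0 := by
  unfold max_xor
  congr 1
  funext r l
  congr 1
  funext r' u
  simp only [max_def]
  split_ifs <;> omega

-- cast helper: ↑(2^k - 1) = 2^k - 1 as integers
theorem pvCastPow (k : ℕ) : (((2^k - 1 : ℕ)) : Int) = 2^k - 1 := by
  have h1 : (1:ℕ) ≤ 2^k := Nat.one_le_two_pow
  push_cast [h1]
  ring

theorem pvIntPowPos (k : ℕ) : (0:Int) < 2^k := pow_pos (by norm_num) k

-- ---- case L ≤ U, 0 ≤ L ----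
theorem pvCaseNN (L U : Int) (h : L ≤ U) (hL0 : 0 ≤ L) :
    (PySem.List.pyRange L (U+1) 1).foldl
      (fun r l => (PySem.List.pyRange L (U+1) 1).foldl
        (fun r u => max r (PySem.Int.bxor l u)) r) 0
    = 2 ^ (PySem.Int.bitLength (PySem.Int.bxor L U)) - 1 := by
  set k := PySem.Int.bitLength (PySem.Int.bxor L U) with hk
  have hU0 : 0 ≤ U := le_trans hL0 h
  have hpow := pvIntPowPos k
  have hbx : PySem.Int.bxor L U = ((L.toNat ^^^ U.toNat : ℕ) : Int) := pvBxorNN L U hL0 hU0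
  have hnatAbs : (PySem.Int.bxor L U).natAbs = L.toNat ^^^ U.toNat := by
    rw [hbx]; exact Int.natAbs_natCast _
  have hk1 : L.toNat ^^^ U.toNat < 2^k := by
    rw [← hnatAbs]; exact PySem.Int.lt_two_pow_bitLength _
  have hk2 : 2^(k-1) ≤ L.toNat ^^^ U.toNat ∨ (L.toNat = U.toNat ∧ k = 0) := by
    by_cases heq : L = U
    · right
      refine ⟨by rw [heq], ?_⟩
      rw [hk, heq, PySem.Int.bxor_self, PySem.Int.bitLength_zero]
    · left
      have hne : PySem.Int.bxor L U ≠ 0 := by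
        intro h0
        rw [hbx] at h0
        have : L.toNat ^^^ U.toNat = 0 := by exact_mod_cast h0
        have := Nat.xor_eq_zero_iff.mp this
        omega
      have := PySem.Int.two_pow_bitLength_le _ hne
      rw [hnatAbs] at this
      exact this
  apply pvNestedFoldEq _ _ _ (by omega)
  · intro l hl u hu
    rw [PySem.List.mem_pyRange_one] at hl hu
    have hb := pvNatBound hk1 (show L.toNat ≤ l.toNat by omega) (show l.toNat ≤ U.toNat by omega)
      (show L.toNat ≤ u.toNat by omega) (show u.toNat ≤ U.toNat by omega)
    rw [pvBxorNN l u (by omega) (by omega)]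
    have hcast : ((l.toNat ^^^ u.toNat : ℕ) : Int) < ((2^k : ℕ) : Int) := by exact_mod_cast hb
    push_cast at hcast
    omega
  · obtain ⟨a, b, ha1, ha2, hb1, hb2, hx⟩ :=
      pvNatAchieve L.toNat U.toNat k (by omega) hk1 hk2
    refine ⟨(a:Int), ?_, (b:Int), ?_, ?_⟩
    · rw [PySem.List.mem_pyRange_one]; omega
    · rw [PySem.List.mem_pyRange_one]; omega
    · rw [pvBxorNN _ _ (Int.natCast_nonneg _) (Int.natCast_nonneg _)]
      rw [Int.toNat_natCast, Int.toNat_natCast, hx, pvCastPow]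

-- ---- case L ≤ U, U < 0 (two's complement: l ^ u = (~l) ^ (~u)) ----
theorem pvCaseNeg (L U : Int) (h : L ≤ U) (hU0 : U < 0) :
    (PySem.List.pyRange L (U+1) 1).foldl
      (fun r l => (PySem.List.pyRange L (U+1) 1).foldl
        (fun r u => max r (PySem.Int.bxor l u)) r) 0
    = 2 ^ (PySem.Int.bitLength (PySem.Int.bxor L U)) - 1 := by
  set k := PySem.Int.bitLength (PySem.Int.bxor L U) with hk
  have hL0 : L < 0 := lt_of_le_of_lt h hU0
  have hpow := pvIntPowPos k
  set A := (-U-1).toNat with hA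
  set B := (-L-1).toNat with hB
  have hAB : A ≤ B := by omega
  have hbx : PySem.Int.bxor L U = ((A ^^^ B : ℕ) : Int) := by
    rw [pvBxorNeg L U hL0 hU0, Nat.xor_comm]
  have hnatAbs : (PySem.Int.bxor L U).natAbs = A ^^^ B := by
    rw [hbx]; exact Int.natAbs_natCast _
  have hk1 : A ^^^ B < 2^k := by
    rw [← hnatAbs]; exact PySem.Int.lt_two_pow_bitLength _
  have hk2 : 2^(k-1) ≤ A ^^^ B ∨ (A = B ∧ k = 0) := by
    by_cases heq : L = U
    · right
      refine ⟨by omega, ?_⟩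
      rw [hk, heq, PySem.Int.bxor_self, PySem.Int.bitLength_zero]
    · left
      have hne : PySem.Int.bxor L U ≠ 0 := by
        intro h0
        rw [hbx] at h0
        have : A ^^^ B = 0 := by exact_mod_cast h0
        have := Nat.xor_eq_zero_iff.mp this
        omega
      have := PySem.Int.two_pow_bitLength_le _ hne
      rw [hnatAbs] at this
      exact this
  apply pvNestedFoldEq _ _ _ (by omega)
  · intro l hl u hu
    rw [PySem.List.mem_pyRange_one] at hl hu
    have hlneg : l < 0 := by omega
    have huneg : u < 0 := by omega
    have hb := pvNatBound hk1 (show A ≤ (-l-1).toNat by omega) (show (-l-1).toNat ≤ B by omega)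
      (show A ≤ (-u-1).toNat by omega) (show (-u-1).toNat ≤ B by omega)
    rw [pvBxorNeg l u hlneg huneg]
    have hcast : (((-l-1).toNat ^^^ (-u-1).toNat : ℕ) : Int) < ((2^k : ℕ) : Int) := by
      exact_mod_cast hb
    push_cast at hcast
    omega
  · obtain ⟨a, b, ha1, ha2, hb1, hb2, hx⟩ := pvNatAchieve A B k hAB hk1 hk2
    refine ⟨-1-(a:Int), ?_, -1-(b:Int), ?_, ?_⟩
    · rw [PySem.List.mem_pyRange_one]; omega
    · rw [PySem.List.mem_pyRange_one]; omega
    · rw [pvBxorNeg _ _ (by omega) (by omega)]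
      have e1 : (-(-1-(a:Int))-1).toNat = a := by omega
      have e2 : (-(-1-(b:Int))-1).toNat = b := by omega
      rw [e1, e2, hx, pvCastPow]

-- ---- case L < 0 ≤ U (mixed signs) ----
theorem pvCaseMixed (L U : Int) (hL0 : L < 0) (hU0 : 0 ≤ U) :
    (PySem.List.pyRange L (U+1) 1).foldl
      (fun r l => (PySem.List.pyRange L (U+1) 1).foldl
        (fun r u => max r (PySem.Int.bxor l u)) r) 0
    = 2 ^ (max (PySem.Int.bitLength U) (PySem.Int.bitLength (-L-1))) - 1 := by
  set kU := PySem.Int.bitLength U with hkU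
  set kL := PySem.Int.bitLength (-L-1) with hkL
  set K := max kU kL with hK
  have hpow := pvIntPowPos K
  have hU2 : U.toNat < 2^kU := by
    have h2 := PySem.Int.lt_two_pow_bitLength U
    rw [← hkU] at h2
    omega
  have hL2 : (-L-1).toNat < 2^kL := by
    have h2 := PySem.Int.lt_two_pow_bitLength (-L-1)
    rw [← hkL] at h2
    omega
  have hUK : (2:ℕ)^kU ≤ 2^K := Nat.pow_le_pow_right (by norm_num) (le_max_left _ _)
  have hLK : (2:ℕ)^kL ≤ 2^K := Nat.pow_le_pow_right (by norm_num) (le_max_right _ _)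
  apply pvNestedFoldEq _ _ _ (by omega)
  · intro l hl u hu
    rw [PySem.List.mem_pyRange_one] at hl hu
    rcases le_or_gt 0 l with hls | hls <;> rcases le_or_gt 0 u with hus | hus
    · rw [pvBxorNN l u hls hus]
      have hb : l.toNat ^^^ u.toNat < 2^K :=
        Nat.xor_lt_two_pow (by omega) (by omega)
      have hcast : ((l.toNat ^^^ u.toNat : ℕ) : Int) < ((2^K : ℕ) : Int) := by exact_mod_cast hb
      push_cast at hcast
      omega
    · have := pvBxorMixedNeg l u (Or.inl ⟨hls, hus⟩)
      omega
    · have := pvBxorMixedNeg l u (Or.inr ⟨hls, hus⟩)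
      omega
    · rw [pvBxorNeg l u hls hus]
      have hb : (-l-1).toNat ^^^ (-u-1).toNat < 2^K :=
        Nat.xor_lt_two_pow (by omega) (by omega)
      have hcast : (((-l-1).toNat ^^^ (-u-1).toNat : ℕ) : Int) < ((2^K : ℕ) : Int) := by
        exact_mod_cast hb
      push_cast at hcast
      omega
  · rcases le_total kL kU with hcmp | hcmp
    · -- K = kU; a maximising pair lies in [0, U]
      have hKU : K = kU := max_eq_left hcmp
      have hk1 : 0 ^^^ U.toNat < 2^K := by
        rw [Nat.zero_xor, hKU]; omega
      have hk2 : 2^(K-1) ≤ 0 ^^^ U.toNat ∨ ((0:ℕ) = U.toNat ∧ K = 0) := by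
        rw [Nat.zero_xor]
        by_cases hUz : U = 0
        · right
          refine ⟨by omega, ?_⟩
          rw [hKU, hkU, hUz, PySem.Int.bitLength_zero]
        · left
          have h2 := PySem.Int.two_pow_bitLength_le U hUz
          rw [← hkU] at h2
          rw [hKU]
          omega
      obtain ⟨a, b, ha1, ha2, hb1, hb2, hx⟩ := pvNatAchieve 0 U.toNat K (by omega) hk1 hk2
      refine ⟨(a:Int), ?_, (b:Int), ?_, ?_⟩
      · rw [PySem.List.mem_pyRange_one]; omega
      · rw [PySem.List.mem_pyRange_one]; omega
      · rw [pvBxorNN _ _ (Int.natCast_nonneg _) (Int.natCast_nonneg _)]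
        rw [Int.toNat_natCast, Int.toNat_natCast, hx, pvCastPow]
    · -- K = kL; a maximising pair lies in [L, -1]
      have hKL : K = kL := max_eq_right hcmp
      have hk1 : 0 ^^^ (-L-1).toNat < 2^K := by
        rw [Nat.zero_xor, hKL]; omega
      have hk2 : 2^(K-1) ≤ 0 ^^^ (-L-1).toNat ∨ ((0:ℕ) = (-L-1).toNat ∧ K = 0) := by
        rw [Nat.zero_xor]
        by_cases hLz : -L-1 = 0
        · right
          refine ⟨by omega, ?_⟩
          rw [hKL, hkL, hLz, PySem.Int.bitLength_zero]
        · left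
          have h2 := PySem.Int.two_pow_bitLength_le (-L-1) hLz
          rw [← hkL] at h2
          rw [hKL]
          omega
      obtain ⟨a, b, ha1, ha2, hb1, hb2, hx⟩ :=
        pvNatAchieve 0 (-L-1).toNat K (by omega) hk1 hk2
      refine ⟨-1-(a:Int), ?_, -1-(b:Int), ?_, ?_⟩
      · rw [PySem.List.mem_pyRange_one]; omega
      · rw [PySem.List.mem_pyRange_one]; omega
      · rw [pvBxorNeg _ _ (by omega) (by omega)]
        have e1 : (-(-1-(a:Int))-1).toNat = a := by omega
        have e2 : (-(-1-(b:Int))-1).toNat = b := by omega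
        rw [e1, e2, hx, pvCastPow]

-- ===== VERDICT (by name: the statement is the Claim_ definition above) =====
theorem max_xor_spec : Claim_equal_max_xor := by
  intro lower upper _
  unfold Spec_max_xor max_xor_alt
  rw [pvMaxXorEqNested]
  rcases lt_or_ge upper lower with hlt | hle
  · rw [PySem.List.pyRange_one_eq_nil (by omega), if_pos hlt]
    simp
  · rw [if_neg (not_lt.mpr hle)]
    rcases le_or_gt 0 lower with hL | hL
    · rw [if_pos (Or.inl hL)]
      exact pvCaseNN lower upper hle hL
    · rcases lt_or_ge upper 0 with hU | hU
      · rw [if_pos (Or.inr hU)]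
        exact pvCaseNeg lower upper hle hU
      · rw [if_neg (by omega)]
        exact pvCaseMixed lower upper hL hU
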